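-- pv_equiv track=rewrite | github.com/tilerbox/tilegrow | spiralmaker.py | spiral_to_grid
-- ===== SOURCE A (Python) =====
-- from typing import Iterator, Tuple
--
-- def spiral_to_grid(positions: list[Tuple[int, int]]) -> Tuple[list[list[int]], int, int]:
--     """
--     Преобразовать координаты спирали в сетку с отсчетом от 0.
--
--     Args:
--         positions: Список координат (x, y)
--
--     Returns:
--         Tuple[list[list[int]], int, int]:
--             - сетка с индексами позиций
--             - смещение по X
--             - смещение по Y
--     """
--     if not positions:
--         return [], 0, 0
--
--     min_x = min(p[0] for p in positions)
--     max_x = max(p[0] for p in positions)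
--     min_y = min(p[1] for p in positions)
--     max_y = max(p[1] for p in positions)
--
--     width = max_x - min_x + 1
--     height = max_y - min_y + 1
--
--     # Создаем сетку с -1 (пустые клетки)
--     grid = [[-1 for _ in range(width)] for _ in range(height)]
--
--     # Заполняем индексами позиций
--     for idx, (x, y) in enumerate(positions):
--         grid_y = y - min_y
--         grid_x = x - min_x
--         grid[grid_y][grid_x] = idx
--
--     return grid, min_x, min_y
-- ===== SOURCE B (Python) =====
-- from typing import Tuple
--
-- def spiral_to_grid(positions: list) -> Tuple[list, int, int]:
--     if not positions:
--         return [], 0, 0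
--     x0, y0 = positions[0]
--     min_x = max_x = x0
--     min_y = max_y = y0
--     for x, y in positions:
--         if x < min_x:
--             min_x = x
--         if x > max_x:
--             max_x = x
--         if y < min_y:
--             min_y = y
--         if y > max_y:
--             max_y = y
--     index = {}
--     for idx, p in enumerate(positions):
--         index[p] = idx
--     grid = [[index.get((gx + min_x, gy + min_y), -1)
--              for gx in range(max_x - min_x + 1)]
--             for gy in range(max_y - min_y + 1)]
--     return grid, min_x, min_y
-- ===== Notes on version B (the rewrite author's own statement) =====
-- stated objective: alternative
-- what changed: A's four separate min/max generator scans become one running-extrema pass, and A's allocate-a-(-1)-grid-then-mutate fill loop becomes a position-to-index dict built once and looked up in a grid comprehension (last duplicate wins in both).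
import Mathlib
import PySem

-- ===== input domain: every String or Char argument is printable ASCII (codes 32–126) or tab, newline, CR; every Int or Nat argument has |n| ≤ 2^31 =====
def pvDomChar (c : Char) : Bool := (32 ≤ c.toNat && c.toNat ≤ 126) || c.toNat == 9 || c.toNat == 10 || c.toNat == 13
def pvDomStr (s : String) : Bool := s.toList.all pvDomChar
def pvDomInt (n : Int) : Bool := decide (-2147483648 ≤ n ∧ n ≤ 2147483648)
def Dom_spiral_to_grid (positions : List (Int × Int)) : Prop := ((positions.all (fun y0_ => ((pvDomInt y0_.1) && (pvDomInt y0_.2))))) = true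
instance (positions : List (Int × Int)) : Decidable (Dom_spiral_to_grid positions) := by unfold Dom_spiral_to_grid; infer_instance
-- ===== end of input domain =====

-- B replaces A's four min/max comprehension scans by one running-extrema pass and replaces A's
-- mutate-a-(-1)-filled-grid loop by a position→index dict looked up in a grid comprehension (objective: alternative).

-- ===== PORT A =====
-- Python `l[i] = v`; negative-index rule kept; out-of-range (IndexError) is unreachable on A's in-range indices
def pySetAt {α : Type} (l : List α) (i : Int) (v : α) : List α :=
  let j := if i < 0 then i + l.length else i
  l.set j.toNat v

-- body of A's fill loop (one iteration: grid[grid_y][grid_x] = idx)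
def fillStep (min_x min_y : Int) (g : List (List Int)) (ip : Int × (Int × Int)) : List (List Int) :=
  let grid_y := ip.2.2 - min_y
  let grid_x := ip.2.1 - min_x
  pySetAt g grid_y (pySetAt (PySem.List.pyGetD g grid_y []) grid_x ip.1)

def spiral_to_grid (positions : List (Int × Int)) : List (List Int) × Int × Int :=
  match positions with
  | [] => ([], 0, 0)
  | _ :: _ =>
    -- min/max over a generator on a (guarded) nonempty list: min?/max? are `some _`, the default is unreachable
    let min_x := (PySem.List.min? (positions.map (fun p => p.1)) (fun v => v)).getD 0
    let max_x := (PySem.List.max? (positions.map (fun p => p.1)) (fun v => v)).getD 0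
    let min_y := (PySem.List.min? (positions.map (fun p => p.2)) (fun v => v)).getD 0
    let max_y := (PySem.List.max? (positions.map (fun p => p.2)) (fun v => v)).getD 0
    let width := max_x - min_x + 1
    let height := max_y - min_y + 1
    let grid0 := (PySem.List.pyRange 0 height 1).map
      (fun _ => (PySem.List.pyRange 0 width 1).map (fun _ => (-1 : Int)))
    let grid := (PySem.List.enumerate positions 0).foldl (fillStep min_x min_y) grid0
    (grid, min_x, min_y)

-- ===== PORT B =====
-- body of B's running-extrema loop (one iteration of the four if-updates)
def extremaStep (s : Int × Int × Int × Int) (p : Int × Int) : Int × Int × Int × Int :=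
  let s := if p.1 < s.1 then (p.1, s.2.1, s.2.2.1, s.2.2.2) else s
  let s := if p.1 > s.2.1 then (s.1, p.1, s.2.2.1, s.2.2.2) else s
  let s := if p.2 < s.2.2.1 then (s.1, s.2.1, p.2, s.2.2.2) else s
  if p.2 > s.2.2.2 then (s.1, s.2.1, s.2.2.1, p.2) else s

def spiral_to_grid_alt (positions : List (Int × Int)) : List (List Int) × Int × Int :=
  match positions with
  | [] => ([], 0, 0)
  | p0 :: _ =>
    let s := positions.foldl extremaStep (p0.1, p0.1, p0.2, p0.2)
    let min_x := s.1
    let max_x := s.2.1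
    let min_y := s.2.2.1
    let max_y := s.2.2.2
    let index := (PySem.List.enumerate positions 0).foldl
      (fun (d : PySem.Dict (Int × Int) Int) ip => d.insert ip.2 ip.1) PySem.Dict.empty
    let grid := (PySem.List.pyRange 0 (max_y - min_y + 1) 1).map
      (fun gy => (PySem.List.pyRange 0 (max_x - min_x + 1) 1).map
        (fun gx => index.getD (gx + min_x, gy + min_y) (-1)))
    (grid, min_x, min_y)

-- ===== PRECONDITION & SPEC =====
def Spec_spiral_to_grid (positions : List (Int × Int)) (out : List (List Int) × Int × Int) : Prop := out = spiral_to_grid_alt positions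
instance (positions : List (Int × Int)) (out : List (List Int) × Int × Int) : Decidable (Spec_spiral_to_grid positions out) := by unfold Spec_spiral_to_grid; infer_instance

-- ===== CLAIM (what is proved, stated in full; the proofs are below) =====
def Claim_equal_spiral_to_grid : Prop := ∀ (positions : List (Int × Int)), Dom_spiral_to_grid positions → Spec_spiral_to_grid positions (spiral_to_grid positions)

-- ===== LEMMAS AND PROOFS =====

-- the grid B builds from a dict, as a function of the dict
def gridOf (mnx mny W H : Int) (d : PySem.Dict (Int × Int) Int) : List (List Int) :=
  (PySem.List.pyRange 0 H 1).map
    (fun gy => (PySem.List.pyRange 0 W 1).map (fun gx => d.getD (gx + mnx, gy + mny) (-1)))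

-- one step of B's extrema fold is a componentwise running min/max
lemma step_eq (a b c d : Int) (p : Int × Int) :
    extremaStep (a, b, c, d) p = (min a p.1, max b p.1, min c p.2, max d p.2) := by
  dsimp only [extremaStep]
  split_ifs <;> simp_all [min_def, max_def, Prod.ext_iff] <;> omega

-- B's 4-tuple extrema fold is the four running min/max folds at once
lemma extrema_fold (t : List (Int × Int)) (a b c d : Int) :
    t.foldl extremaStep (a, b, c, d)
    = (t.foldl (fun m p => min m p.1) a, t.foldl (fun m p => max m p.1) b,
       t.foldl (fun m p => min m p.2) c, t.foldl (fun m p => max m p.2) d) := by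
  induction t generalizing a b c d with
  | nil => rfl
  | cons p t ih =>
    simp only [List.foldl_cons]
    rw [step_eq, ih]

-- one Python assignment into A's grid = one insertion into B's dict
lemma step_grid (mnx mxx mny mxy : Int) (d : PySem.Dict (Int × Int) Int)
    (x y i : Int) (hx1 : mnx ≤ x) (hx2 : x ≤ mxx) (hy1 : mny ≤ y) (hy2 : y ≤ mxy) :
    pySetAt (gridOf mnx mny (mxx - mnx + 1) (mxy - mny + 1) d) (y - mny)
      (pySetAt (PySem.List.pyGetD (gridOf mnx mny (mxx - mnx + 1) (mxy - mny + 1) d) (y - mny) []) (x - mnx) i)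
    = gridOf mnx mny (mxx - mnx + 1) (mxy - mny + 1) (d.insert (x, y) i) := by
  have hy0 : ¬ (y - mny < 0) := by omega
  have hx0 : ¬ (x - mnx < 0) := by omega
  have hlen : (gridOf mnx mny (mxx - mnx + 1) (mxy - mny + 1) d).length = (mxy - mny + 1).toNat := by
    simp [gridOf, PySem.List.length_pyRange_one]
  have hrow : PySem.List.pyGetD (gridOf mnx mny (mxx - mnx + 1) (mxy - mny + 1) d) (y - mny) []
      = (PySem.List.pyRange 0 (mxx - mnx + 1) 1).map
          (fun gx => d.getD (gx + mnx, ((y - mny).toNat : Int) + mny) (-1)) := by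
    rw [PySem.List.pyGetD_eq_getElem _ _ (by omega) (by rw [hlen]; omega)]
    simp [gridOf, PySem.List.getElem_pyRange_one]
  unfold pySetAt
  simp only [hy0, hx0, if_false, hrow]
  apply List.ext_getElem
  · simp [gridOf, PySem.List.length_pyRange_one]
  · intro n h1 h2
    have hH : n < (mxy - mny + 1).toNat := by
      simpa [gridOf, PySem.List.length_pyRange_one] using h2
    rw [List.getElem_set]
    by_cases hn : (y - mny).toNat = n
    · rw [if_pos hn]
      subst hn
      simp only [gridOf, List.getElem_map, PySem.List.getElem_pyRange_one]
      apply List.ext_getElem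
      · simp [PySem.List.length_pyRange_one]
      · intro k k1 k2
        have hW : k < (mxx - mnx + 1).toNat := by
          simpa [PySem.List.length_pyRange_one] using k2
        rw [List.getElem_set]
        by_cases hk : (x - mnx).toNat = k
        · rw [if_pos hk]
          subst hk
          simp only [List.getElem_map, PySem.List.getElem_pyRange_one]
          have hkey : ((0 : Int) + ((x - mnx).toNat : Int) + mnx, (0 : Int) + ((y - mny).toNat : Int) + mny) = (x, y) := by
            simp only [Prod.mk.injEq]
            constructor <;> omega
          rw [hkey, PySem.Dict.getD_insert_self]
        · rw [if_neg hk]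
          simp only [List.getElem_map, PySem.List.getElem_pyRange_one]
          have hne : ((0 : Int) + (k : Int) + mnx, (0 : Int) + ((y - mny).toNat : Int) + mny) ≠ (x, y) := by
            simp only [ne_eq, Prod.mk.injEq, not_and]
            intro h _
            apply hk
            omega
          rw [PySem.Dict.getD_insert_of_ne _ _ _ hne]
          norm_num
    · rw [if_neg hn]
      simp only [gridOf, List.getElem_map, PySem.List.getElem_pyRange_one]
      apply List.map_congr_left
      intro gx hgx
      have hne : (gx + mnx, (0 : Int) + (n : Int) + mny) ≠ (x, y) := by
        simp only [ne_eq, Prod.mk.injEq, not_and]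
        intro _ h
        apply hn
        omega
      rw [PySem.Dict.getD_insert_of_ne _ _ _ hne]

-- A's whole fill fold, relative to B's dict fold, over any suffix of the enumeration
lemma fill_fold (mnx mxx mny mxy : Int) (e : List (Int × (Int × Int)))
    (hb : ∀ q ∈ e, mnx ≤ q.2.1 ∧ q.2.1 ≤ mxx ∧ mny ≤ q.2.2 ∧ q.2.2 ≤ mxy)
    (d : PySem.Dict (Int × Int) Int) :
    e.foldl (fillStep mnx mny)
      (gridOf mnx mny (mxx - mnx + 1) (mxy - mny + 1) d)
    = gridOf mnx mny (mxx - mnx + 1) (mxy - mny + 1)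
        (e.foldl (fun d ip => d.insert ip.2 ip.1) d) := by
  induction e generalizing d with
  | nil => rfl
  | cons q e ih =>
    simp only [List.foldl_cons]
    obtain ⟨h1, h2, h3, h4⟩ := hb q (List.mem_cons_self ..)
    show List.foldl (fillStep mnx mny) (fillStep mnx mny _ q) e = _
    unfold fillStep
    rw [step_grid mnx mxx mny mxy d q.2.1 q.2.2 q.1 h1 h2 h3 h4]
    exact ih (fun r hr => hb r (List.mem_cons_of_mem _ hr)) _

-- the empty grid of -1s is the grid of the empty dict
lemma grid0_eq (mnx mny W H : Int) :
    (PySem.List.pyRange 0 H 1).map (fun _ => (PySem.List.pyRange 0 W 1).map (fun _ => (-1 : Int)))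
    = gridOf mnx mny W H PySem.Dict.empty := by
  unfold gridOf
  apply List.map_congr_left
  intro gy _
  apply List.map_congr_left
  intro gx _
  rfl

-- A's filled grid equals B's comprehension grid, for any common extrema enclosing all positions
lemma grids_eq (positions : List (Int × Int)) (mnx mxx mny mxy : Int)
    (hb : ∀ q ∈ positions, mnx ≤ q.1 ∧ q.1 ≤ mxx ∧ mny ≤ q.2 ∧ q.2 ≤ mxy) :
    (PySem.List.enumerate positions 0).foldl (fillStep mnx mny)
      ((PySem.List.pyRange 0 (mxy - mny + 1) 1).map
        (fun _ => (PySem.List.pyRange 0 (mxx - mnx + 1) 1).map (fun _ => (-1 : Int))))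
    = (PySem.List.pyRange 0 (mxy - mny + 1) 1).map
        (fun gy => (PySem.List.pyRange 0 (mxx - mnx + 1) 1).map
          (fun gx => ((PySem.List.enumerate positions 0).foldl
              (fun (d : PySem.Dict (Int × Int) Int) ip => d.insert ip.2 ip.1)
              PySem.Dict.empty).getD (gx + mnx, gy + mny) (-1))) := by
  rw [grid0_eq mnx mny, fill_fold mnx mxx mny mxy _ ?hb]
  · rfl
  case hb =>
    intro q hq
    rw [PySem.List.mem_enumerate_iff] at hq
    obtain ⟨k, hk, rfl⟩ := hq
    exact hb positions[k] (List.getElem_mem hk)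

-- ===== VERDICT (by name: the statement is the Claim_ definition above) =====
theorem spiral_to_grid_spec : Claim_equal_spiral_to_grid := by
  intro positions _
  unfold Spec_spiral_to_grid
  match positions with
  | [] => rfl
  | p0 :: t =>
    have hminx : (PySem.List.min? ((p0 :: t).map (fun p => p.1)) (fun v => v)).getD 0
        = t.foldl (fun m p => min m p.1) p0.1 := by
      simp [PySem.List.min?_id_cons, List.foldl_map]
    have hmaxx : (PySem.List.max? ((p0 :: t).map (fun p => p.1)) (fun v => v)).getD 0
        = t.foldl (fun m p => max m p.1) p0.1 := by
      simp [PySem.List.max?_id_cons, List.foldl_map]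
    have hminy : (PySem.List.min? ((p0 :: t).map (fun p => p.2)) (fun v => v)).getD 0
        = t.foldl (fun m p => min m p.2) p0.2 := by
      simp [PySem.List.min?_id_cons, List.foldl_map]
    have hmaxy : (PySem.List.max? ((p0 :: t).map (fun p => p.2)) (fun v => v)).getD 0
        = t.foldl (fun m p => max m p.2) p0.2 := by
      simp [PySem.List.max?_id_cons, List.foldl_map]
    have hs : (p0 :: t).foldl extremaStep (p0.1, p0.1, p0.2, p0.2)
        = (t.foldl (fun m p => min m p.1) p0.1, t.foldl (fun m p => max m p.1) p0.1,
           t.foldl (fun m p => min m p.2) p0.2, t.foldl (fun m p => max m p.2) p0.2) := by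
      rw [List.foldl_cons, step_eq, min_self, max_self, min_self, max_self, extrema_fold]
    have hb : ∀ q ∈ p0 :: t,
        t.foldl (fun m p => min m p.1) p0.1 ≤ q.1 ∧ q.1 ≤ t.foldl (fun m p => max m p.1) p0.1 ∧
        t.foldl (fun m p => min m p.2) p0.2 ≤ q.2 ∧ q.2 ≤ t.foldl (fun m p => max m p.2) p0.2 := by
      intro q hq
      refine ⟨?_, ?_, ?_, ?_⟩
      · simpa using PySem.List.min?_isMin (xs := (p0 :: t).map (fun p => p.1)) (key := fun v => v)
          (by simp [PySem.List.min?_id_cons, List.foldl_map]) q.1 (List.mem_map_of_mem hq)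
      · simpa using PySem.List.max?_isMax (xs := (p0 :: t).map (fun p => p.1)) (key := fun v => v)
          (by simp [PySem.List.max?_id_cons, List.foldl_map]) q.1 (List.mem_map_of_mem hq)
      · simpa using PySem.List.min?_isMin (xs := (p0 :: t).map (fun p => p.2)) (key := fun v => v)
          (by simp [PySem.List.min?_id_cons, List.foldl_map]) q.2 (List.mem_map_of_mem hq)
      · simpa using PySem.List.max?_isMax (xs := (p0 :: t).map (fun p => p.2)) (key := fun v => v)
          (by simp [PySem.List.max?_id_cons, List.foldl_map]) q.2 (List.mem_map_of_mem hq)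
    show spiral_to_grid (p0 :: t) = spiral_to_grid_alt (p0 :: t)
    simp only [spiral_to_grid, spiral_to_grid_alt, hminx, hmaxx, hminy, hmaxy, hs]
    rw [grids_eq (p0 :: t) _ _ _ _ hb]
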